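-- pv_equiv track=rewrite | github.com/ChrisS2812/ComputingMaximumSuffixes | BruteForce.py | is_leaf
-- ===== SOURCE A (Python) =====
-- M = 5
--
-- def is_leaf(index):
--     if M < 1:
--         return True
--
--     last_non_leaf_index = -1
--     for i in range(0, M):
--         last_non_leaf_index += 3 ** i
--     if index <= last_non_leaf_index:
--         return False
--     else:
--         return True
-- ===== SOURCE B (Python) =====
-- M = 5
--
-- def is_leaf(index):
--     if M < 1:
--         return True
--     # closed form of the geometric series sum_{i=0}^{M-1} 3**i = (3**M - 1) // 2
--     return index > (3 ** M - 1) // 2 - 1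
-- ===== Notes on version B (the rewrite author's own statement) =====
-- stated objective: simpler
-- what changed: Replaced the accumulation loop over range(M) with a single comparison against the closed-form geometric-series threshold.
import Mathlib
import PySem

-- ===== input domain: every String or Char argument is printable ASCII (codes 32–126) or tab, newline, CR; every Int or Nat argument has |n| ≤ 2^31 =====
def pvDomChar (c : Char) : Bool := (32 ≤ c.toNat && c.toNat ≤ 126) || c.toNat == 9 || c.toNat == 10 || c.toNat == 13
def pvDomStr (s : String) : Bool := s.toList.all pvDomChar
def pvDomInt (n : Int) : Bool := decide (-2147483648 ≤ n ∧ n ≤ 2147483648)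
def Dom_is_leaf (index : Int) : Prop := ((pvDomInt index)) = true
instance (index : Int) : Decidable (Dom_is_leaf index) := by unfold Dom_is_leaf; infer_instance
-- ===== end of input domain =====

-- B replaces A's range(M) accumulation loop with the closed-form geometric-series threshold (simpler, no loop).
-- ===== PORT A =====
-- literal port of A: guard on M < 1, then the range(0,M) accumulation loop
def pyM : Int := 5
def is_leaf (index : Int) : Bool :=
  if pyM < 1 then true
  else
    let last_non_leaf_index : Int :=
      (PySem.List.pyRange 0 pyM 1).foldl (fun acc i => acc + 3 ^ i.toNat) (-1)
    if index ≤ last_non_leaf_index then false else true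

-- ===== PORT B =====
-- B: closed-form geometric-series threshold, single comparison; no loop.
def is_leaf_alt (index : Int) : Bool :=
  if pyM < 1 then true
  else decide (index > PySem.Int.floordiv (3 ^ pyM.toNat - 1) 2 - 1)

-- ===== PRECONDITION & SPEC =====
def Spec_is_leaf (index : Int) (out : Bool) : Prop := out = is_leaf_alt index
instance (index : Int) (out : Bool) : Decidable (Spec_is_leaf index out) := by unfold Spec_is_leaf; infer_instance

-- ===== CLAIM (what is proved, stated in full; the proofs are below) =====
def Claim_equal_is_leaf : Prop := ∀ (index : Int), Dom_is_leaf index → Spec_is_leaf index (is_leaf index)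

-- ===== LEMMAS AND PROOFS =====

-- ===== VERDICT (by name: the statement is the Claim_ definition above) =====
theorem is_leaf_spec : Claim_equal_is_leaf := by
  intro index _
  unfold Spec_is_leaf is_leaf is_leaf_alt
  have h : (PySem.List.pyRange 0 pyM 1).foldl (fun acc i => acc + 3 ^ i.toNat) (-1) = (120 : Int) := by decide
  rw [h]
  have h2 : PySem.Int.floordiv (3 ^ pyM.toNat - 1) 2 - 1 = (120 : Int) := by decide
  rw [h2]
  simp only [pyM]
  by_cases h3 : index ≤ 120 <;> simp [h3] <;> omega
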